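-- pv_equiv track=rewrite | github.com/kyle-eros/eros-schedule-generator | scripts/generate_schedule.py | select_spaced_hours
-- ===== SOURCE A (Python) =====
-- MIN_PPV_SPACING_HOURS = 3  # Critical: minimum 3 hours between PPVs
--
-- def select_spaced_hours(available_hours: list[int], count: int) -> list[int]:
--     """
--     Select hours ensuring minimum 3-hour spacing between them.
--
--     Uses a greedy algorithm that prioritizes best hours while maintaining spacing.
--     Will NOT relax spacing constraint - returns fewer hours if needed.
--     """
--     if count <= 0:
--         return []
--
--     # Sort available hours (prefer distributing across the day)
--     sorted_hours = sorted(available_hours)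
--
--     # Try to select hours with 3+ hour spacing
--     selected = []
--
--     # Start with early morning, then fill in with spacing
--     for hour in sorted_hours:
--         if len(selected) >= count:
--             break
--
--         # Check spacing with all already selected hours
--         has_space = all(abs(hour - h) >= MIN_PPV_SPACING_HOURS for h in selected)
--         if has_space:
--             selected.append(hour)
--
--     # If we still need more, try again with remaining hours
--     if len(selected) < count:
--         remaining = [h for h in sorted_hours if h not in selected]
--         for hour in remaining:
--             if len(selected) >= count:
--                 break
--             has_space = all(abs(hour - h) >= MIN_PPV_SPACING_HOURS for h in selected)
--             if has_space:
--                 selected.append(hour)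
--
--     selected.sort()
--     return selected
-- ===== SOURCE B (Python) =====
-- def select_spaced_hours(available_hours: list[int], count: int) -> list[int]:
--     """Single ascending pass: track only the last selected hour; since hours are
--     visited in sorted order, spacing against all selected reduces to spacing
--     against the last one, and the result is already sorted."""
--     if count <= 0:
--         return []
--     selected = []
--     last = None
--     for hour in sorted(available_hours):
--         if len(selected) >= count:
--             break
--         if last is None or hour - last >= 3:
--             selected.append(hour)
--             last = hour
--     return selected
-- ===== Notes on version B (the rewrite author's own statement) =====
-- stated objective: faster
-- what changed: B replaces A's two greedy loops with an inner all()-scan over every selected hour (plus a dead second pass and a final sort) by a single ascending pass that tracks only the last selected hour, since in sorted order spacing against all selected hours reduces to spacing against the last one and the output is already sorted.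
import Mathlib
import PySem

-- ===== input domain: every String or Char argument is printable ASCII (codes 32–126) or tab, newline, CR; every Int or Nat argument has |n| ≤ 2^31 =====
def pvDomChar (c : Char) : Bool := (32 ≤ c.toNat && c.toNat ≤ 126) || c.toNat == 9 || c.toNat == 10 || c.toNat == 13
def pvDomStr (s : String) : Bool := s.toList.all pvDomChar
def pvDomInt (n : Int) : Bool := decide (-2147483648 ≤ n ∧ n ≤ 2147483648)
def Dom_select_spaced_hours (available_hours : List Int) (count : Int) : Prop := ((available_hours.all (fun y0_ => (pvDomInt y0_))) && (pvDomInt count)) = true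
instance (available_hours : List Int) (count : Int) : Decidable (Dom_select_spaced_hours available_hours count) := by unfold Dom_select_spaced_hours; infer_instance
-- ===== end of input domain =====

-- B replaces A's two greedy loops (inner all()-scan, dead second pass, final sort) by one
-- ascending pass tracking only the last selected hour; measured faster in a timing run.

-- ===== PORT A =====
-- the greedy loop body shared verbatim by A's two 'for hour in …' loops
def pvLoopA (count : Int) : List Int → List Int → List Int
  | [], sel => sel
  | h :: t, sel =>
    if count ≤ (sel.length : Int) then sel
    else if sel.all (fun x => decide (3 ≤ |h - x|)) then pvLoopA count t (sel ++ [h])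
    else pvLoopA count t sel

def select_spaced_hours (available_hours : List Int) (count : Int) : List Int :=
  if count ≤ 0 then []
  else
    let sorted_hours := PySem.List.sorted available_hours (fun x => x) false
    let selected := pvLoopA count sorted_hours []
    let selected2 :=
      if (selected.length : Int) < count then
        pvLoopA count (sorted_hours.filter (fun h => !(selected.contains h))) selected
      else selected
    PySem.List.sorted selected2 (fun x => x) false

-- ===== PORT B =====
def pvLoopB (count : Int) : List Int → Option Int → List Int → List Int
  | [], _, sel => sel
  | h :: t, last, sel =>
    if count ≤ (sel.length : Int) then sel
    else match last with
      | none => pvLoopB count t (some h) (sel ++ [h])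
      | some l => if 3 ≤ h - l then pvLoopB count t (some h) (sel ++ [h])
                  else pvLoopB count t (some l) sel

def select_spaced_hours_alt (available_hours : List Int) (count : Int) : List Int :=
  if count ≤ 0 then []
  else pvLoopB count (PySem.List.sorted available_hours (fun x => x) false) none []

-- ===== PRECONDITION & SPEC =====
def Spec_select_spaced_hours (available_hours : List Int) (count : Int) (out : List Int) : Prop := out = select_spaced_hours_alt available_hours count
instance (available_hours : List Int) (count : Int) (out : List Int) : Decidable (Spec_select_spaced_hours available_hours count out) := by unfold Spec_select_spaced_hours; infer_instance

-- ===== CLAIM (what is proved, stated in full; the proofs are below) =====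
def Claim_equal_select_spaced_hours : Prop := ∀ (available_hours : List Int) (count : Int), Dom_select_spaced_hours available_hours count → Spec_select_spaced_hours available_hours count (select_spaced_hours available_hours count)

-- ===== LEMMAS AND PROOFS =====

-- sel is a prefix of pvLoopA's result
theorem pvLoopA_prefix (count : Int) (l sel : List Int) :
    sel <+: pvLoopA count l sel := by
  induction l generalizing sel with
  | nil => simp [pvLoopA]
  | cons h t ih =>
    simp only [pvLoopA]
    split
    · exact List.prefix_refl sel
    · split
      · exact List.IsPrefix.trans (List.prefix_append sel [h]) (ih (sel ++ [h]))
      · exact ih sel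

-- if every hour of l fails spacing against sel, the loop adds nothing
theorem pvLoopA_noop (count : Int) (l sel : List Int)
    (hf : ∀ h ∈ l, sel.all (fun x => decide (3 ≤ |h - x|)) = false) :
    pvLoopA count l sel = sel := by
  induction l with
  | nil => rfl
  | cons h t ih =>
    simp only [pvLoopA]
    split
    · rfl
    · rw [hf h (List.mem_cons_self ..)]
      simp only [Bool.false_eq_true, if_false]
      exact ih (fun x hx => hf x (List.mem_cons_of_mem _ hx))

-- if the result is still short of count, every input hour was either selected
-- or fails spacing against the final selection
theorem pvLoopA_post (count : Int) (l sel : List Int)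
    (hlen : ((pvLoopA count l sel).length : Int) < count) :
    ∀ h ∈ l, h ∈ pvLoopA count l sel ∨
      (pvLoopA count l sel).all (fun x => decide (3 ≤ |h - x|)) = false := by
  induction l generalizing sel with
  | nil => intro h hh; cases hh
  | cons h t ih =>
    intro g hg
    simp only [pvLoopA] at hlen ⊢
    split at hlen
    · rename_i hbrk
      simp only [if_pos hbrk]
      omega
    · rename_i hbrk
      simp only [if_neg hbrk]
      split at hlen
      · rename_i hsp
        simp only [if_pos hsp]
        rcases List.mem_cons.mp hg with rfl | hgt
        · left
          exact (pvLoopA_prefix count t (sel ++ [g])).subset (by simp)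
        · exact ih (sel ++ [h]) hlen g hgt
      · rename_i hsp
        simp only [if_neg hsp]
        rcases List.mem_cons.mp hg with rfl | hgt
        · right
          simp only [Bool.not_eq_true, List.all_eq_false] at hsp ⊢
          obtain ⟨x, hx, hx3⟩ := hsp
          exact ⟨x, (pvLoopA_prefix count t sel).subset hx, hx3⟩
        · exact ih sel hlen g hgt

-- the spacing test against a sorted selection reduces to the last element
theorem pv_all_iff (sel : List Int) (m h : Int)
    (hlast : sel.getLast? = some m)
    (hmax : ∀ x ∈ sel, x ≤ m) (hmh : m ≤ h) :
    sel.all (fun x => decide (3 ≤ |h - x|)) = decide (3 ≤ h - m) := by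
  by_cases hc : 3 ≤ h - m
  · simp only [hc, decide_true, List.all_eq_true, decide_eq_true_iff]
    intro x hx
    have := hmax x hx
    rw [abs_of_nonneg (by omega)]
    omega
  · simp only [hc, decide_false, List.all_eq_false]
    refine ⟨m, List.mem_of_getLast? hlast, ?_⟩
    rw [abs_of_nonneg (by omega)]
    simp; omega

-- A's first loop computes exactly B's loop, on a sorted input
theorem pvLoopA_eq_loopB (count : Int) (l sel : List Int)
    (hl : l.Pairwise (· ≤ ·))
    (hle : ∀ x ∈ sel, ∀ h ∈ l, x ≤ h)
    (hmax : ∀ m, sel.getLast? = some m → ∀ x ∈ sel, x ≤ m) :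
    pvLoopA count l sel = pvLoopB count l sel.getLast? sel := by
  induction l generalizing sel with
  | nil => rfl
  | cons h t ih =>
    simp only [pvLoopA, pvLoopB]
    split
    · rfl
    · have hht : ∀ g ∈ t, h ≤ g := fun g hg => (List.pairwise_cons.mp hl).1 g hg
      have htl : t.Pairwise (· ≤ ·) := (List.pairwise_cons.mp hl).2
      have happ : ∀ (s : List Int), (s ++ [h]).getLast? = some h := by simp
      have hnew_le : ∀ x ∈ sel ++ [h], ∀ g ∈ t, x ≤ g := by
        intro x hx g hg
        rcases List.mem_append.mp hx with hx | hx
        · exact hle x hx g (List.mem_cons_of_mem _ hg)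
        · simp at hx; subst hx; exact hht g hg
      have hnew_max : ∀ m, (sel ++ [h]).getLast? = some m → ∀ x ∈ sel ++ [h], x ≤ m := by
        intro m hm x hx
        rw [happ sel] at hm
        injection hm with hm; subst hm
        rcases List.mem_append.mp hx with hx | hx
        · exact hle x hx h (List.mem_cons_self ..)
        · simp at hx; omega
      cases hsel : sel.getLast? with
      | none =>
        have : sel = [] := by
          cases sel with
          | nil => rfl
          | cons a s => simp at hsel
        subst this
        simp only [List.all_nil, if_true, List.nil_append]
        rw [ih [h] htl
          (by intro x hx g hg; simp at hx; subst hx; exact hht g hg)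
          (by intro m hm x hx; simp at hm hx; omega)]
        simp
      | some m =>
        rw [pv_all_iff sel m h hsel (hmax m hsel)
          (hle m (List.mem_of_getLast? hsel) h (List.mem_cons_self ..))]
        by_cases hc : 3 ≤ h - m
        · simp only [hc, decide_true, if_true]
          rw [ih (sel ++ [h]) htl hnew_le hnew_max, happ sel]
        · simp only [hc, decide_false, Bool.false_eq_true, if_false]
          rw [ih sel htl
            (fun x hx g hg => hle x hx g (List.mem_cons_of_mem _ hg)) hmax, hsel]

-- the selection produced from a sorted input is non-strictly sorted
theorem pvLoopA_sorted (count : Int) (l sel : List Int)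
    (hl : l.Pairwise (· ≤ ·))
    (hle : ∀ x ∈ sel, ∀ h ∈ l, x ≤ h)
    (hs : sel.Pairwise (· ≤ ·)) :
    (pvLoopA count l sel).Pairwise (· ≤ ·) := by
  induction l generalizing sel with
  | nil => exact hs
  | cons h t ih =>
    simp only [pvLoopA]
    split
    · exact hs
    · have hht : ∀ g ∈ t, h ≤ g := fun g hg => (List.pairwise_cons.mp hl).1 g hg
      have htl : t.Pairwise (· ≤ ·) := (List.pairwise_cons.mp hl).2
      split
      · refine ih (sel ++ [h]) htl ?_ ?_
        · intro x hx g hg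
          rcases List.mem_append.mp hx with hx | hx
          · exact hle x hx g (List.mem_cons_of_mem _ hg)
          · simp at hx; subst hx; exact hht g hg
        · refine List.pairwise_append.mpr ⟨hs, by simp, ?_⟩
          intro x hx y hy
          rw [List.mem_singleton] at hy
          exact le_of_le_of_eq (hle x hx h (List.mem_cons_self ..)) hy.symm
      · exact ih sel htl (fun x hx g hg => hle x hx g (List.mem_cons_of_mem _ hg)) hs

theorem select_spaced_hours_eq (available_hours : List Int) (count : Int) :
    select_spaced_hours available_hours count = select_spaced_hours_alt available_hours count := by
  unfold select_spaced_hours select_spaced_hours_alt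
  split
  · rfl
  · generalize hgen : PySem.List.sorted available_hours (fun x => x) false = l
    have hlp : l.Pairwise (· ≤ ·) := by
      rw [← hgen]; exact PySem.List.sorted_pairwise available_hours (fun x => x)
    show (PySem.List.sorted (if ((pvLoopA count l []).length : Int) < count then
        pvLoopA count (List.filter (fun h => !(pvLoopA count l []).contains h) l) (pvLoopA count l [])
      else pvLoopA count l []) (fun x => x) false) = pvLoopB count l none []
    generalize hrg : pvLoopA count l [] = r
    have hr_sorted : r.Pairwise (· ≤ ·) := by
      rw [← hrg]; exact pvLoopA_sorted count l [] hlp (by simp) (by simp)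
    have hAB : r = pvLoopB count l none [] := by
      rw [← hrg]; simpa using pvLoopA_eq_loopB count l [] hlp (by simp) (by simp)
    have hstep : (if (r.length : Int) < count then
        pvLoopA count (l.filter (fun h => !(r.contains h))) r else r) = r := by
      split
      · rename_i hlt
        apply pvLoopA_noop
        intro h hh
        have hh' := List.mem_filter.mp hh
        have hnm : h ∉ r := by simpa using hh'.2
        subst hrg
        rcases pvLoopA_post count l [] hlt h hh'.1 with hin | hfail
        · exact absurd hin hnm
        · exact hfail
      · rfl
    rw [hstep, PySem.List.sorted_eq_self_of_pairwise r (fun x => x) (by simpa using hr_sorted), hAB]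

-- ===== VERDICT (by name: the statement is the Claim_ definition above) =====
theorem select_spaced_hours_spec : Claim_equal_select_spaced_hours := by
  intro available_hours count _
  exact select_spaced_hours_eq available_hours count
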